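-- pv_equiv track=rewrite | github.com/cloudhubs/log_matcher | src/aggregator.py | aggregate_data
-- ===== SOURCE A (Python) =====
-- class Output:
--     signature = ""
--     unique_matches = 0
--     matches = 0
--     unique_values = 0
--     total_values = 0
--
--     # Definition: Converts the obejct to a String format for output to a file or to stdout
--     # @params: self the "this" object to print
--     # @return: a string with all the attributes printed in JSON format
--     def __str__(self):
--         return "\t{\"" + self.signature + "\": [" + str(self.unique_matches) + "," + str(self.matches) + "," + str(
--             self.unique_values) + "," + str(self.total_values) + "]},\n"
--
-- def aggregate_data(data):
--     output_data = []
--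
--     for sig in data.keys():
--         obj = Output()
--         obj.signature = sig
--         obj.unique_values = len(data[sig].keys())
--
--         for value in data[sig].keys():
--             if data[sig][value][0] > 0:
--                 obj.unique_matches += 1
--             obj.matches += data[sig][value][0]
--             obj.total_values += data[sig][value][1]
--
--         output_data.append(obj)
--
--     output_string = "[\n"
--     for obj in output_data:
--         output_string += str(obj)
--     output_string += "]"
--
--     return output_string
-- ===== SOURCE B (Python) =====
-- def aggregate_data(data):
--     # Flatten the nested dicts into one event stream and aggregate it in a single
--     # flat pass into one accumulator dict keyed by signature, then format.
--     events = [(sig, entry) for sig, values in data.items() for entry in values.values()]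
--     acc = {sig: (0, 0, 0) for sig in data}
--     for sig, entry in events:
--         um, m, tv = acc[sig]
--         acc[sig] = (um + (1 if entry[0] > 0 else 0), m + entry[0], tv + entry[1])
--     lines = "".join(
--         '\t{"%s": [%d,%d,%d,%d]},\n' % (sig, acc[sig][0], acc[sig][1], len(values), acc[sig][2])
--         for sig, values in data.items()
--     )
--     return "[\n" + lines + "]"
-- ===== Notes on version B (the rewrite author's own statement) =====
-- stated objective: alternative
-- what changed: Replaces A's nested per-signature accumulation (an Output object mutated by an inner loop, collected into a list, then stringified) by a flat event-stream design: the nested dict is flattened into one list of (signature, entry) events, a single flat loop folds all events into one accumulator dict of (unique_matches, matches, total_values) triples, and a separate formatting pass renders each line from that dict; Pre_ excludes inner value lists shorter than 2 (A raises IndexError there) and association lists with duplicate keys, which no Python dict can represent.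
import Mathlib
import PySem

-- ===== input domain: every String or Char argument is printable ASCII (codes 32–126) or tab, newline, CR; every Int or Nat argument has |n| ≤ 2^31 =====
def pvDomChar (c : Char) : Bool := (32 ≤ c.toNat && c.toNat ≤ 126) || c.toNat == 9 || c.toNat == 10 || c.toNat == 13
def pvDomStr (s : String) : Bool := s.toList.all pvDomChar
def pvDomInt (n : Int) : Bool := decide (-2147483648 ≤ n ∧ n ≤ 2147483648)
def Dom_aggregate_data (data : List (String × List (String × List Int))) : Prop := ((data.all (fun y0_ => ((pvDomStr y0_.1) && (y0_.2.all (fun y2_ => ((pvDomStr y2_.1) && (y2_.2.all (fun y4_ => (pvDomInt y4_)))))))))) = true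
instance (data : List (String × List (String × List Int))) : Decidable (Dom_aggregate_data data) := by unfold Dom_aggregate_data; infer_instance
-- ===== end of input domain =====

-- B flattens the nested dicts into one (signature, entry) event stream, folds all events
-- in a single flat pass into one accumulator dict of triples, and formats in a second pass.

-- ===== PORT A =====
-- Output.__str__
def pvOutStr (sig : String) (um m uv tv : Int) : String :=
  "\t{\"" ++ sig ++ "\": [" ++ PySem.Int.toStr um ++ "," ++ PySem.Int.toStr m ++ ","
    ++ PySem.Int.toStr uv ++ "," ++ PySem.Int.toStr tv ++ "]},\n"

-- literal transliteration of A: build output_data (signature + four counters per sig,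
-- the inner loop accumulating (unique_matches, matches, total_values)), then concatenate.
def aggregate_data (data : List (String × List (String × List Int))) : String :=
  let output_data : List (String × Int × Int × Int × Int) :=
    data.foldl (fun acc p =>
      let sig := p.1
      let dsig := ((PySem.Dict.mk data).get? sig).getD []        -- data[sig]
      let unique_values : Int := dsig.length
      let st := (dsig.map Prod.fst).foldl (fun (st : Int × Int × Int) value =>
          let entry := ((PySem.Dict.mk dsig).get? value).getD []  -- data[sig][value]
          ((if (PySem.List.pyGet? entry 0).getD 0 > 0 then st.1 + 1 else st.1),
           st.2.1 + (PySem.List.pyGet? entry 0).getD 0,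
           st.2.2 + (PySem.List.pyGet? entry 1).getD 0)) (0, 0, 0)
      acc ++ [(sig, st.1, st.2.1, unique_values, st.2.2)]) []
  let output_string :=
    output_data.foldl (fun s o => s ++ pvOutStr o.1 o.2.1 o.2.2.1 o.2.2.2.1 o.2.2.2.2) "[\n"
  output_string ++ "]"

-- ===== PORT B =====
-- transliteration of Source B: flat event list, one fold over it into an accumulator dict,
-- then a formatting pass.  acc[sig] is read with getD: exact here, since every event's
-- signature was inserted by the initialisation pass (no KeyError on any Pre_ input).
def pvStep (t : Int × Int × Int) (entry : List Int) : Int × Int × Int :=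
  ((if (PySem.List.pyGet? entry 0).getD 0 > 0 then t.1 + 1 else t.1),
   t.2.1 + (PySem.List.pyGet? entry 0).getD 0,
   t.2.2 + (PySem.List.pyGet? entry 1).getD 0)

def aggregate_data_alt (data : List (String × List (String × List Int))) : String :=
  let events : List (String × List Int) :=
    data.flatMap (fun p => p.2.map (fun q => (p.1, q.2)))
  let acc0 : PySem.Dict String (Int × Int × Int) :=
    data.foldl (fun d p => d.insert p.1 (0, 0, 0)) PySem.Dict.empty
  let acc := events.foldl (fun d e => d.insert e.1 (pvStep (d.getD e.1 (0, 0, 0)) e.2)) acc0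
  let lines := String.join (data.map (fun p =>
    let t := acc.getD p.1 (0, 0, 0)
    "\t{\"" ++ p.1 ++ "\": [" ++ PySem.Int.toStr t.1 ++ "," ++ PySem.Int.toStr t.2.1 ++ ","
      ++ PySem.Int.toStr (p.2.length : Int) ++ "," ++ PySem.Int.toStr t.2.2 ++ "]},\n"))
  "[\n" ++ lines ++ "]"

-- ===== PRECONDITION & SPEC =====
-- Pre_ excludes (a) inner value lists with fewer than 2 entries, on which Python A raises
-- IndexError (B raises there too), and (b) association lists with duplicate keys (outer or
-- inner), which have no Python-dict counterpart (a Python dict collapses them), so the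
-- ports' first-match reading of them is not A's behaviour on any real input.
def Pre_aggregate_data (data : List (String × List (String × List Int))) : Prop :=
  (data.map Prod.fst).Nodup ∧
  ∀ p ∈ data, (p.2.map Prod.fst).Nodup ∧ ∀ q ∈ p.2, 2 ≤ q.2.length
instance (data : List (String × List (String × List Int))) : Decidable (Pre_aggregate_data data) := by
  unfold Pre_aggregate_data; infer_instance

def pvWitness_aggregate_data : (List (String × List (String × List Int))) :=
  [("sig a", [("v1", [1, 2]), ("v2", [0, 3])]), ("sig b", [])]

def Spec_aggregate_data (data : List (String × List (String × List Int))) (out : String) : Prop := out = aggregate_data_alt data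
instance (data : List (String × List (String × List Int))) (out : String) : Decidable (Spec_aggregate_data data out) := by unfold Spec_aggregate_data; infer_instance

-- ===== CLAIM (what is proved, stated in full; the proofs are below) =====
def Claim_equal_aggregate_data : Prop := ∀ (data : List (String × List (String × List Int))), Dom_aggregate_data data → Pre_aggregate_data data → Spec_aggregate_data data (aggregate_data data)

-- ===== LEMMAS AND PROOFS =====

-- first-match lookup of a present key in a dup-free association list is its own value
theorem pv_get?_mk_of_nodup {ν : Type} (l : List (String × ν)) (k : String) (v : ν)
    (hnd : (l.map Prod.fst).Nodup) (hmem : (k, v) ∈ l) :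
    (PySem.Dict.mk l).get? k = some v := by
  induction l with
  | nil => cases hmem
  | cons q t ih =>
    obtain ⟨k', v'⟩ := q
    rw [PySem.Dict.get?_mk_cons]
    simp only [List.map_cons, List.nodup_cons] at hnd
    rcases List.mem_cons.mp hmem with h | h
    · cases h; simp
    · have hne : (k' == k) = false := by
        apply beq_eq_false_iff_ne.mpr
        intro he
        apply hnd.1
        rw [he]
        exact List.mem_map.mpr ⟨(k, v), h, rfl⟩
      rw [hne]; simp only [if_neg Bool.false_ne_true]
      exact ih hnd.2 h

-- folding over the keys of a dup-free association list, looking each key up again,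
-- is folding over its pairs directly
theorem pv_foldl_keys_lookup {ν σ : Type} (d : ν) (F : σ → ν → σ)
    (l : List (String × ν)) (init : σ) (hnd : (l.map Prod.fst).Nodup) :
    (l.map Prod.fst).foldl (fun st k => F st (((PySem.Dict.mk l).get? k).getD d)) init
      = l.foldl (fun st q => F st q.2) init := by
  induction l generalizing init with
  | nil => rfl
  | cons q t ih =>
    obtain ⟨k, v⟩ := q
    simp only [List.map_cons, List.nodup_cons] at hnd
    simp only [List.map_cons, List.foldl_cons]
    rw [PySem.Dict.get?_mk_cons]
    simp only [BEq.rfl, if_true, Option.getD_some]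
    rw [PySem.List.foldl_congr_mem (t.map Prod.fst)
      (fun st k' => F st (((PySem.Dict.mk ((k, v) :: t)).get? k').getD d))
      (fun st k' => F st (((PySem.Dict.mk t).get? k').getD d)) _
      (by
        intro acc x hx
        have hne : (k == x) = false := by
          apply beq_eq_false_iff_ne.mpr
          intro he; subst he; exact hnd.1 hx
        simp only [PySem.Dict.get?_mk_cons, hne, Bool.false_eq_true, if_false])]
    exact ih _ hnd.2

-- B's flat event fold, read back at one key, is a fold of the step over that key's events
theorem pv_getD_foldl_step {ν β : Type} (f : ν → β → ν) (d0 : ν)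
    (l : List (String × β)) (d : PySem.Dict String ν) (k : String) :
    (l.foldl (fun d e => d.insert e.1 (f (d.getD e.1 d0) e.2)) d).getD k d0
      = ((l.filter (fun e => e.1 == k)).map Prod.snd).foldl f (d.getD k d0) := by
  induction l generalizing d with
  | nil => rfl
  | cons e t ih =>
    simp only [List.foldl_cons, List.filter_cons]
    by_cases h : e.1 = k
    · subst h
      simp only [BEq.rfl, if_true, List.map_cons, List.foldl_cons, ih,
        PySem.Dict.getD_insert]
    · have hne : (e.1 == k) = false := beq_eq_false_iff_ne.mpr h
      have hne2 : ¬ (k = e.1) := fun he => h he.symm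
      simp only [hne, Bool.false_eq_true, if_false, ih, PySem.Dict.getD_insert, if_neg hne2]

-- the initialisation pass maps every present key to the constant triple
theorem pv_getD_init {ν β : Type} (c : ν) (l : List (String × β)) (d : PySem.Dict String ν)
    (k : String) (hk : k ∈ l.map Prod.fst ∨ d.getD k c = c) :
    (l.foldl (fun d p => d.insert p.1 c) d).getD k c = c := by
  induction l generalizing d with
  | nil => simpa using hk.resolve_left (by simp)
  | cons p t ih =>
    simp only [List.foldl_cons]
    apply ih
    rcases hk with h | h
    · rcases List.mem_cons.mp h with h' | h'
      · right; rw [PySem.Dict.getD_insert, if_pos h']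
      · left; exact h'
    · right
      rw [PySem.Dict.getD_insert]
      split_ifs with he
      · rfl
      · exact h

-- with dup-free outer keys, the events carrying p's signature are exactly p's values
theorem pv_filter_events (data : List (String × List (String × List Int)))
    (p : String × List (String × List Int)) (hp : p ∈ data)
    (hnd : (data.map Prod.fst).Nodup) :
    (((data.flatMap (fun q => q.2.map (fun r => (q.1, r.2)))).filter
        (fun e => e.1 == p.1)).map Prod.snd) = p.2.map Prod.snd := by
  induction data with
  | nil => cases hp
  | cons q t ih =>
    simp only [List.map_cons, List.nodup_cons] at hnd
    simp only [List.flatMap_cons, List.filter_append, List.map_append]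
    by_cases h : q.1 = p.1
    · have hpq : q = p := by
        rcases List.mem_cons.mp hp with h' | h'
        · exact h'.symm
        · exact absurd (List.mem_map.mpr ⟨p, h', h.symm⟩) hnd.1
      subst hpq
      have h1 : (q.2.map (fun r => (q.1, r.2))).filter (fun e => e.1 == q.1)
          = q.2.map (fun r => (q.1, r.2)) := by
        apply List.filter_eq_self.mpr
        intro e he
        obtain ⟨r, _, hr⟩ := List.mem_map.mp he
        simp [← hr]
      have h2 : (t.flatMap (fun q' => q'.2.map (fun r => (q'.1, r.2)))).filter
          (fun e => e.1 == q.1) = [] := by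
        apply List.filter_eq_nil_iff.mpr
        intro e he
        obtain ⟨q', hq', he'⟩ := List.mem_flatMap.mp he
        obtain ⟨r, _, hr⟩ := List.mem_map.mp he'
        intro hc
        have he1 : e.1 = q'.1 := by rw [← hr]
        exact hnd.1 (List.mem_map.mpr ⟨q', hq', he1 ▸ beq_iff_eq.mp hc⟩)
      rw [h1, h2]
      simp [List.map_map, Function.comp]
    · have hpt : p ∈ t := by
        rcases List.mem_cons.mp hp with h' | h'
        · exact absurd (congrArg Prod.fst h'.symm) h
        · exact h'
      have h1 : (q.2.map (fun r => (q.1, r.2))).filter (fun e => e.1 == p.1) = [] := by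
        apply List.filter_eq_nil_iff.mpr
        intro e he
        obtain ⟨r, _, hr⟩ := List.mem_map.mp he
        intro hc
        have he1 : e.1 = q.1 := by rw [← hr]
        exact h (he1 ▸ beq_iff_eq.mp hc)
      rw [h1]
      simp only [List.map_nil, List.nil_append]
      exact ih hpt hnd.2

-- left-fold of ++ over formatted elements, from s, is s ++ the join of the lines
theorem pv_join_eq (l : List String) (s : String) :
    l.foldl (fun a x => a ++ x) s = s ++ String.join l := by
  induction l generalizing s with
  | nil => simp [String.join]
  | cons x t ih =>
    rw [List.foldl_cons, ih, show String.join (x :: t) = ("" ++ x) ++ String.join t from ih ("" ++ x),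
      String.append_assoc]
    simp

theorem pv_foldl_strcat {α : Type} (F : α → String) (l : List α) (s : String) :
    l.foldl (fun a x => a ++ F x) s = s ++ String.join (l.map F) := by
  rw [← List.foldl_map, pv_join_eq]

-- ===== VERDICT (by name: the statement is the Claim_ definition above) =====
theorem aggregate_data_spec : Claim_equal_aggregate_data := by
  intro data _ hpre
  obtain ⟨hout, hin⟩ := hpre
  show aggregate_data data = aggregate_data_alt data
  simp only [aggregate_data, aggregate_data_alt]
  rw [PySem.List.foldl_append_singleton_eq_map, List.nil_append, pv_foldl_strcat]
  congr 1
  apply congrArg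
  apply congrArg
  rw [List.map_map]
  apply List.map_congr_left
  intro p hp
  -- A's line for p
  have hd : ((PySem.Dict.mk data).get? p.1).getD [] = p.2 := by
    rw [pv_get?_mk_of_nodup data p.1 p.2 hout hp]; rfl
  simp only [Function.comp, hd]
  rw [pv_foldl_keys_lookup ([] : List Int)
    (fun (st : Int × Int × Int) (entry : List Int) =>
      ((if (PySem.List.pyGet? entry 0).getD 0 > 0 then st.1 + 1 else st.1),
       st.2.1 + (PySem.List.pyGet? entry 0).getD 0,
       st.2.2 + (PySem.List.pyGet? entry 1).getD 0)) p.2 (0, 0, 0) (hin p hp).1]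
  -- B's line for p
  rw [pv_getD_foldl_step pvStep ((0, 0, 0) : Int × Int × Int)]
  rw [pv_filter_events data p hp hout]
  rw [pv_getD_init ((0, 0, 0) : Int × Int × Int) data PySem.Dict.empty p.1
    (Or.inl (List.mem_map.mpr ⟨p, hp, rfl⟩))]
  rw [List.foldl_map]
  simp only [pvOutStr, pvStep]
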